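-- pv_equiv track=rewrite | github.com/rkya/ai_golomb_ruler | submit.py | isValueConsistent
-- ===== SOURCE A (Python) =====
-- def isValueConsistent(value, assignedVariables, distance):
--     newSetValues = set()
--     for marker in assignedVariables:
--         newDistance = abs(value - marker)
--         # Check for consistency i.e. space between every pair of markers is distinct and markers do not overlap
--         if newDistance in distance or newDistance in newSetValues or newDistance == 0:
--             return False, set()
--         newSetValues.add(newDistance)
--
--     if len(assignedVariables) == 0:
--         if value in distance or value in newSetValues:
--             return False, set()
--         newSetValues.add(value)
--     return True, newSetValues
-- ===== SOURCE B (Python) =====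
-- def isValueConsistent(value, assignedVariables, distance):
--     if not assignedVariables:
--         if value in distance:
--             return False, set()
--         return True, {value}
--     ds = [abs(value - m) for m in assignedVariables]
--     srt = sorted(ds)
--     if srt[0] == 0 or any(x == y for x, y in zip(srt, srt[1:])):
--         return False, set()
--     dset = set(distance)
--     if any(d in dset for d in ds):
--         return False, set()
--     return True, set(ds)
-- ===== Notes on version B (the rewrite author's own statement) =====
-- stated objective: alternative
-- what changed: Replaces A's incremental seen-set loop by a sort of the distance list with an adjacent-pair scan for duplicates, and a set built once from `distance` for the membership test instead of A's per-element list scan.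
import Mathlib
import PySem

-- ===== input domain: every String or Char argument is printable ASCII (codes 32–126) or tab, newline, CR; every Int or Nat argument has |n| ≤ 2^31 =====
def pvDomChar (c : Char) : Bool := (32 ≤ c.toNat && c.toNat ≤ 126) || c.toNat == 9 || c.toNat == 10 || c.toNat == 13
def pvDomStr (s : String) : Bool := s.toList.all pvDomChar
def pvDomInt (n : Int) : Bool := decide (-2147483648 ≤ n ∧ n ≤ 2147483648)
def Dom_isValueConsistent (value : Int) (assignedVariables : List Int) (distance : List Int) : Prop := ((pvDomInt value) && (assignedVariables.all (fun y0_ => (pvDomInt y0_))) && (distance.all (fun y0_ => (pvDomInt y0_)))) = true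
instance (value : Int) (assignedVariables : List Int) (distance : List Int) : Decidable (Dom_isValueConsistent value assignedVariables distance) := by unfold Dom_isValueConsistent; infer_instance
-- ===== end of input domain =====

-- B replaces A's incremental seen-set loop by sorting the distance list and scanning
-- adjacent pairs for duplicates, with a prebuilt set for the `distance` membership test;
-- equal return value proved on all inputs.
-- ===== PORT A =====
-- the 'for marker in assignedVariables' loop; none = the early 'return False, set()'
def pvLoopA (value : Int) (distance : List Int) : List Int → PySem.Set Int → Option (PySem.Set Int)
  | [], s => some s
  | m :: rest, s =>
    let newDistance := |value - m|
    if newDistance ∈ distance ∨ newDistance ∈ s ∨ newDistance = 0 then none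
    else pvLoopA value distance rest (PySem.Set.add s newDistance)

def isValueConsistent (value : Int) (assignedVariables : List Int) (distance : List Int) : Bool × List Int :=
  match pvLoopA value distance assignedVariables PySem.Set.empty with
  | none => (false, PySem.Set.empty)
  | some newSetValues =>
    if assignedVariables.length = 0 then
      if value ∈ distance ∨ value ∈ newSetValues then (false, PySem.Set.empty)
      else (true, PySem.Set.add newSetValues value)
    else (true, newSetValues)

-- ===== PORT B =====
-- 'any(x == y for x, y in zip(srt, srt[1:]))'
def pvHasAdjDup (l : List Int) : Bool :=
  (l.zip (l.drop 1)).any (fun p => p.1 == p.2)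

def isValueConsistent_alt (value : Int) (assignedVariables : List Int) (distance : List Int) : Bool × List Int :=
  if assignedVariables = [] then
    if value ∈ distance then (false, PySem.Set.empty) else (true, [value])
  else
    -- ds = [abs(value - m) …]; srt = sorted(ds); srt is nonempty here, so srt[0] is headD
    if (PySem.List.sorted (assignedVariables.map (fun m => |value - m|)) (fun x => x) false).headD 0 = 0
        ∨ pvHasAdjDup (PySem.List.sorted (assignedVariables.map (fun m => |value - m|)) (fun x => x) false) = true then
      (false, PySem.Set.empty)
    else if (assignedVariables.map (fun m => |value - m|)).any
        (fun d => PySem.Set.contains (PySem.Set.ofList distance) d) then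
      (false, PySem.Set.empty)
    else (true, PySem.Set.ofList (assignedVariables.map (fun m => |value - m|)))

-- ===== PRECONDITION & SPEC =====
def Spec_isValueConsistent (value : Int) (assignedVariables : List Int) (distance : List Int) (out : Bool × List Int) : Prop := out = isValueConsistent_alt value assignedVariables distance
instance (value : Int) (assignedVariables : List Int) (distance : List Int) (out : Bool × List Int) : Decidable (Spec_isValueConsistent value assignedVariables distance out) := by unfold Spec_isValueConsistent; infer_instance

-- ===== CLAIM (what is proved, stated in full; the proofs are below) =====
def Claim_equal_isValueConsistent : Prop := ∀ (value : Int) (assignedVariables : List Int) (distance : List Int), Dom_isValueConsistent value assignedVariables distance → Spec_isValueConsistent value assignedVariables distance (isValueConsistent value assignedVariables distance)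

-- ===== LEMMAS AND PROOFS =====

-- A's loop characterised: fails iff some distance is in `distance`, zero, already in s, or duplicated
lemma pvLoopA_char (value : Int) (distance : List Int) (l : List Int) (s : PySem.Set Int) :
    pvLoopA value distance l s =
      if (∃ d ∈ l.map (fun m => |value - m|), d ∈ distance ∨ d = 0 ∨ d ∈ s) ∨
         ¬ (l.map (fun m => |value - m|)).Nodup
      then none
      else some (PySem.Set.update s (l.map (fun m => |value - m|))) := by
  induction l generalizing s with
  | nil => simp [pvLoopA, PySem.Set.update]
  | cons m t ih =>
    simp only [pvLoopA, List.map_cons]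
    by_cases hbad : |value - m| ∈ distance ∨ |value - m| ∈ s ∨ |value - m| = 0
    · rw [if_pos hbad, if_pos]
      left
      exact ⟨_, List.mem_cons_self, by tauto⟩
    · push Not at hbad
      obtain ⟨h1, h2, h3⟩ := hbad
      rw [if_neg (by tauto), ih, PySem.Set.update_cons]
      have hiff : ((∃ d ∈ t.map (fun m => |value - m|), d ∈ distance ∨ d = 0 ∨ d ∈ PySem.Set.add s (|value - m|)) ∨
            ¬ (t.map (fun m => |value - m|)).Nodup)
          ↔ ((∃ d ∈ (|value - m| :: t.map (fun m => |value - m|)), d ∈ distance ∨ d = 0 ∨ d ∈ s) ∨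
            ¬ (|value - m| :: t.map (fun m => |value - m|)).Nodup) := by
        constructor
        · rintro (⟨d, hd, hp | hp | hp⟩ | h)
          · exact Or.inl ⟨d, List.mem_cons_of_mem _ hd, Or.inl hp⟩
          · exact Or.inl ⟨d, List.mem_cons_of_mem _ hd, Or.inr (Or.inl hp)⟩
          · rcases (PySem.Set.mem_add s _ d).mp hp with hp' | hp'
            · exact Or.inl ⟨d, List.mem_cons_of_mem _ hd, Or.inr (Or.inr hp')⟩
            · refine Or.inr (fun hn => ?_)
              exact (List.nodup_cons.mp hn).1 (hp' ▸ hd)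
          · exact Or.inr (fun hn => h (List.nodup_cons.mp hn).2)
        · rintro (⟨d, hd, hp⟩ | h)
          · rcases List.mem_cons.mp hd with rfl | hd'
            · rcases hp with hp | hp | hp
              · exact absurd hp h1
              · exact absurd hp h3
              · exact absurd hp h2
            · rcases hp with hp | hp | hp
              · exact Or.inl ⟨d, hd', Or.inl hp⟩
              · exact Or.inl ⟨d, hd', Or.inr (Or.inl hp)⟩
              · exact Or.inl ⟨d, hd', Or.inr (Or.inr ((PySem.Set.mem_add s _ d).mpr (Or.inl hp)))⟩
          · rw [List.nodup_cons, not_and_or, not_not] at h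
            rcases h with h | h
            · exact Or.inl ⟨_, h, Or.inr (Or.inr ((PySem.Set.mem_add s _ _).mpr (Or.inr rfl)))⟩
            · exact Or.inr h
      rw [if_congr hiff rfl rfl]

-- on a ≤-sorted list, an adjacent duplicate exists iff the list has any duplicate
lemma pvHasAdjDup_iff (l : List Int) (hs : l.Pairwise (· ≤ ·)) :
    pvHasAdjDup l = true ↔ ¬ l.Nodup := by
  induction l with
  | nil => simp [pvHasAdjDup]
  | cons a t ih =>
    cases t with
    | nil => simp [pvHasAdjDup]
    | cons b u =>
      have hab : a ≤ b := (List.pairwise_cons.mp hs).1 b List.mem_cons_self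
      have hbu : ∀ y ∈ u, b ≤ y := fun y hy =>
        (List.pairwise_cons.mp (List.pairwise_cons.mp hs).2).1 y hy
      have ht : (b :: u).Pairwise (· ≤ ·) := (List.pairwise_cons.mp hs).2
      simp only [pvHasAdjDup, List.drop_one, List.tail_cons, List.zip_cons_cons, List.any_cons,
        Bool.or_eq_true, beq_iff_eq] at ih ⊢
      rw [ih ht]
      constructor
      · rintro (rfl | h)
        · simp [List.nodup_cons]
        · exact fun hn => h (List.nodup_cons.mp hn).2
      · intro h
        by_cases hab' : a = b
        · exact Or.inl hab'
        · right
          intro hn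
          apply h
          rw [List.nodup_cons]
          refine ⟨?_, hn⟩
          intro hmem
          rcases List.mem_cons.mp hmem with h1 | h1
          · exact hab' h1
          · exact hab' (le_antisymm hab (hbu a h1))

-- head of sorted(ds) is 0 iff 0 ∈ ds, for nonempty ds of nonnegative elements
lemma pvSortedHead_zero (ds : List Int) (hne : ds ≠ []) (hnn : ∀ d ∈ ds, 0 ≤ d) :
    (PySem.List.sorted ds (fun x => x) false).headD 0 = 0 ↔ (0 : Int) ∈ ds := by
  cases hsrt : PySem.List.sorted ds (fun x => x) false with
  | nil => exact absurd ((PySem.List.sorted_eq_nil_iff ds (fun x => x) false).mp hsrt) hne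
  | cons m t =>
    have hmem : m ∈ ds :=
      (PySem.List.mem_sorted ds (fun x => x) false m).mp (hsrt ▸ List.mem_cons_self)
    simp only [List.headD_cons]
    constructor
    · intro h0
      rwa [h0] at hmem
    · intro h0
      exact le_antisymm (PySem.List.key_head_sorted_le ds (fun x => x) hsrt 0 h0) (hnn m hmem)

-- ===== VERDICT (by name: the statement is the Claim_ definition above) =====
theorem isValueConsistent_spec : Claim_equal_isValueConsistent := by
  intro value assignedVariables distance _
  unfold Spec_isValueConsistent isValueConsistent isValueConsistent_alt
  rw [pvLoopA_char]
  cases assignedVariables with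
  | nil =>
    rw [if_neg (by simp)]
    by_cases hv : value ∈ distance <;>
      simp [PySem.Set.empty, PySem.Set.add, PySem.Set.contains, PySem.Set.update, hv]
  | cons a t =>
    have hne : (a :: t) ≠ ([] : List Int) := by simp
    rw [if_neg hne]
    set ds := (a :: t).map (fun m => |value - m|) with hds
    have hdsne : ds ≠ [] := by simp [hds]
    have hnn : ∀ d ∈ ds, 0 ≤ d := by
      intro d hd
      rw [hds] at hd
      obtain ⟨m, _, rfl⟩ := List.mem_map.mp hd
      exact abs_nonneg _
    have hperm : (PySem.List.sorted ds (fun x => x) false).Perm ds :=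
      PySem.List.sorted_perm ds (fun x => x) false
    have hpw : (PySem.List.sorted ds (fun x => x) false).Pairwise (· ≤ ·) :=
      PySem.List.sorted_pairwise ds (fun x => x)
    -- A's failure condition ↔ B's two-stage failure condition
    have hcond : ((∃ d ∈ ds, d ∈ distance ∨ d = 0 ∨ d ∈ (PySem.Set.empty : PySem.Set Int)) ∨ ¬ ds.Nodup)
        ↔ (((PySem.List.sorted ds (fun x => x) false).headD 0 = 0 ∨ pvHasAdjDup (PySem.List.sorted ds (fun x => x) false) = true)
           ∨ ds.any (fun d => PySem.Set.contains (PySem.Set.ofList distance) d) = true) := by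
      rw [pvHasAdjDup_iff _ hpw, hperm.nodup_iff, pvSortedHead_zero ds hdsne hnn]
      simp only [PySem.Set.empty, List.not_mem_nil, or_false, List.any_eq_true,
        PySem.Set.contains_iff, PySem.Set.mem_ofList]
      constructor
      · rintro (⟨d, hd, hp | hp⟩ | h)
        · exact Or.inr ⟨d, hd, hp⟩
        · subst hp; exact Or.inl (Or.inl hd)
        · exact Or.inl (Or.inr h)
      · rintro ((h | h) | ⟨d, hd, hp⟩)
        · exact Or.inl ⟨0, h, Or.inr rfl⟩
        · exact Or.inr h
        · exact Or.inl ⟨d, hd, Or.inl hp⟩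
    by_cases hA : (∃ d ∈ ds, d ∈ distance ∨ d = 0 ∨ d ∈ (PySem.Set.empty : PySem.Set Int)) ∨ ¬ ds.Nodup
    · rw [if_pos hA]
      by_cases hC1 : ((PySem.List.sorted ds (fun x => x) false).headD 0 = 0 ∨ pvHasAdjDup (PySem.List.sorted ds (fun x => x) false) = true)
      · rw [if_pos hC1]
      · have hC2 := (hcond.mp hA).resolve_left hC1
        rw [if_neg hC1, if_pos hC2]
    · rw [if_neg hA]
      have hnB : ¬ (((PySem.List.sorted ds (fun x => x) false).headD 0 = 0 ∨ pvHasAdjDup (PySem.List.sorted ds (fun x => x) false) = true)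
           ∨ ds.any (fun d => PySem.Set.contains (PySem.Set.ofList distance) d) = true) :=
        fun h => hA (hcond.mpr h)
      rw [if_neg (fun h => hnB (Or.inl h)), if_neg (fun h => hnB (Or.inr h))]
      simp [PySem.Set.empty, PySem.Set.update_nil_left]
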